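-- pv_equiv track=rewrite | github.com/luthfianto/identity-card-aws-old | extractors/ktp.py | _get_birthday_date
-- ===== SOURCE A (Python) =====
-- def _get_birthday_date(birthday_str_raw: str):
--     i = 0
--     j = 0
--     for char in birthday_str_raw[::-1]:
--         i += 1
--         if char.isdigit():
--             j += 1
--         # Should at least have 8 digits
--         if j >= 8:
--             res = birthday_str_raw[-i:]
--             return res
--     return birthday_str_raw
-- ===== SOURCE B (Python) =====
-- def _get_birthday_date(birthday_str_raw: str):
--     digits = [k for k, c in enumerate(birthday_str_raw) if c.isdigit()]
--     if len(digits) >= 8: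
--         return birthday_str_raw[digits[-8]:]
--     return birthday_str_raw
-- ===== Notes on version B (the rewrite author's own statement) =====
-- stated objective: simpler
-- what changed: Replaces the right-to-left counter scan with early exit by building the list of digit indices in one comprehension and returning a single slice from the 8th-from-last digit index.
import Mathlib
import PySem

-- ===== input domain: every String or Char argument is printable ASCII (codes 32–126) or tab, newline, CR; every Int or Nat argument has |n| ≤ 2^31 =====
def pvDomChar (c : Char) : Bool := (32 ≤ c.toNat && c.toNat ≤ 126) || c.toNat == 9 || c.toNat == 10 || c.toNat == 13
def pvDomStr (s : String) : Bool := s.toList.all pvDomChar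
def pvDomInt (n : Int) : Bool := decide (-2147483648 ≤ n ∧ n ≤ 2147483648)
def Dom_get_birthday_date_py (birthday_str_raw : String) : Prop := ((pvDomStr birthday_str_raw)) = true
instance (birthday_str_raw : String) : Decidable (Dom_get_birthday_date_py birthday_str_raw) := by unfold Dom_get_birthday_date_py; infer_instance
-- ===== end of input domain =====

-- B replaces A's right-to-left counter scan with early exit by one digit-index comprehension
-- and a single slice (objective: simpler). Both are total; return values only, no mutation.

-- ===== PORT A =====
-- A's loop 'for char in birthday_str_raw[::-1]': s[::-1] is the reversed character
-- sequence (PySem.Str.slice?_none_none_neg_one), iterated here as s.toList.reverse;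
-- char.isdigit() on a 1-character string is PySem.Chars.isdigit of that character.
def pvLoopA (s : String) : List Char → Nat → Nat → String
  | [], _, _ => s
  | c :: rest, i, j =>
    let i' := i + 1
    let j' := if PySem.Chars.isdigit c then j + 1 else j
    if 8 ≤ j' then PySem.Str.slice s (some (-(i' : Int))) none
    else pvLoopA s rest i' j'

def get_birthday_date_py (birthday_str_raw : String) : String :=
  pvLoopA birthday_str_raw birthday_str_raw.toList.reverse 0 0

-- ===== PORT B =====
-- digits = [k for k, c in enumerate(s) if c.isdigit()]
def pvDigitIdx (l : List Char) : List Int :=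
  ((PySem.List.enumerate l 0).filter (fun p => PySem.Chars.isdigit p.2)).map (·.1)

def get_birthday_date_py_alt (birthday_str_raw : String) : String :=
  let digits := pvDigitIdx birthday_str_raw.toList
  if 8 ≤ digits.length then
    match PySem.List.pyGet? digits (-8) with   -- digits[-8]; in range since len(digits) >= 8
    | some k => PySem.Str.slice birthday_str_raw (some k) none
    | none => birthday_str_raw
  else birthday_str_raw

-- ===== PRECONDITION & SPEC =====
def Spec_get_birthday_date_py (birthday_str_raw : String) (out : String) : Prop := out = get_birthday_date_py_alt birthday_str_raw
instance (birthday_str_raw : String) (out : String) : Decidable (Spec_get_birthday_date_py birthday_str_raw out) := by unfold Spec_get_birthday_date_py; infer_instance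

-- ===== CLAIM (what is proved, stated in full; the proofs are below) =====
def Claim_equal_get_birthday_date_py : Prop := ∀ (birthday_str_raw : String), Dom_get_birthday_date_py birthday_str_raw → Spec_get_birthday_date_py birthday_str_raw (get_birthday_date_py birthday_str_raw)

-- ===== LEMMAS AND PROOFS =====

lemma pvDigitIdx_nil : pvDigitIdx [] = [] := rfl

lemma pvDigitIdx_append_singleton (l : List Char) (c : Char) :
    pvDigitIdx (l ++ [c]) =
      pvDigitIdx l ++ (if PySem.Chars.isdigit c then [(l.length : Int)] else []) := by
  simp only [pvDigitIdx, PySem.List.enumerate_append, PySem.List.enumerate_cons,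
    PySem.List.enumerate_nil, List.filter_append, List.map_append]
  split_ifs with h <;> simp [List.filter, h]

lemma pvLoopA_cons (s : String) (c : Char) (rest : List Char) (i j : Nat) :
    pvLoopA s (c :: rest) i j =
      if 8 ≤ (if PySem.Chars.isdigit c then j + 1 else j)
      then PySem.Str.slice s (some (-((i + 1 : Nat) : Int))) none
      else pvLoopA s rest (i + 1) (if PySem.Chars.isdigit c then j + 1 else j) := rfl

lemma pvLoopA_eq (s : String) (r : List Char) (i j : Nat)
    (hlen : s.toList.length = i + r.length) (hj : j < 8) :
    pvLoopA s r i j =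
      (if 8 - j ≤ (pvDigitIdx r.reverse).length
       then PySem.Str.slice s
         (some ((pvDigitIdx r.reverse).getD ((pvDigitIdx r.reverse).length - (8 - j)) 0)) none
       else s) := by
  induction r generalizing i j with
  | nil =>
    simp only [pvLoopA, List.reverse_nil, pvDigitIdx_nil, List.length_nil]
    rw [if_neg (by omega)]
  | cons c rest ih =>
    simp only [List.length_cons] at hlen
    rw [List.reverse_cons, pvDigitIdx_append_singleton, pvLoopA_cons]
    by_cases hd : PySem.Chars.isdigit c
    · rw [if_pos hd, if_pos hd]
      by_cases hj7 : j = 7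
      · -- the 8th digit from the end is found here
        subst hj7
        rw [if_pos (by omega), if_pos (by simp)]
        apply String.toList_inj.mp
        rw [PySem.Str.toList_slice, PySem.Str.toList_slice,
          PySem.Chars.slice_eq_listSlice, PySem.Chars.slice_eq_listSlice,
          PySem.List.slice_from_neg_natCast s.toList (i + 1) (by omega)]
        have hidx : ((pvDigitIdx rest.reverse ++ [(rest.reverse.length : Int)]).getD
            ((pvDigitIdx rest.reverse ++ [(rest.reverse.length : Int)]).length - (8 - 7)) 0)
            = ((rest.length : Nat) : Int) := by
          simp [List.getD]
        rw [hidx, PySem.List.slice_from_natCast]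
        congr 1
        omega
      · -- a digit, but fewer than 8 seen so far: keep scanning
        rw [if_neg (by omega), ih (i + 1) (j + 1) (by omega) (by omega)]
        by_cases hc : 8 - (j + 1) ≤ (pvDigitIdx rest.reverse).length
        · rw [if_pos hc, if_pos (by simp; omega)]
          congr 2
          rw [List.getD, List.getD, List.getElem?_append_left (by simp; omega)]
          congr 2
          simp
          omega
        · rw [if_neg hc, if_neg (by simp; omega)]
    · -- not a digit
      rw [if_neg hd, if_neg hd, if_neg (by omega), ih (i + 1) j (by omega) hj]
      simp only [List.append_nil]

-- ===== VERDICT (by name: the statement is the Claim_ definition above) =====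
theorem get_birthday_date_py_spec : Claim_equal_get_birthday_date_py := by
  intro s _
  unfold Spec_get_birthday_date_py get_birthday_date_py get_birthday_date_py_alt
  rw [pvLoopA_eq s s.toList.reverse 0 0 (by simp) (by omega)]
  rw [List.reverse_reverse]
  set d := pvDigitIdx s.toList with hd
  by_cases hc : 8 ≤ d.length
  · rw [if_pos (by omega), if_pos hc]
    rw [PySem.List.pyGet?_neg_ofNat d 8 (by omega) hc]
    have hlt : d.length - 8 < d.length := by omega
    rw [List.getElem?_eq_getElem hlt]
    simp only [List.getD, List.getElem?_eq_getElem hlt, Option.getD_some]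
  · rw [if_neg (by omega), if_neg hc]
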